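-- pv_equiv track=rewrite | github.com/judithvdw/AOC2022 | 05.py | parse_start_state
-- ===== SOURCE A (Python) =====
-- from collections import defaultdict
--
-- def parse_start_state(start):
--     d = defaultdict(list)
--     for row in start.split("\n")[::-1]:
--         row = row[1::4]  # Every 4th character is the crate (or the space above the crates)
--         for i, value in enumerate(row):
--             if value != " ":
--                 d[i + 1].append(value)  # +1 so the key matches the instructions
--     return d
-- ===== SOURCE B (Python) =====
-- from collections import defaultdict
--
-- def parse_start_state(start):
--     # Extract all crates bottom-up as a flat (column, letter) event list,
--     # then group: keys in first-appearance order, each stack by one filter pass.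
--     crates = [
--         (i + 1, ch)
--         for row in reversed(start.split("\n"))
--         for i, ch in enumerate(row[1::4])
--         if ch != " "
--     ]
--     d = defaultdict(list)
--     for key in dict.fromkeys(k for k, _ in crates):
--         d[key] = [ch for k, ch in crates if k == key]
--     return d
-- ===== Notes on version B (the rewrite author's own statement) =====
-- stated objective: alternative
-- what changed: A builds the stacks by mutating a defaultdict while scanning rows bottom-up; B first flattens the grid into a (column, letter) event list, then groups it: keys deduplicated in first-appearance order and each stack produced by one filter pass over the events.
import Mathlib
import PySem

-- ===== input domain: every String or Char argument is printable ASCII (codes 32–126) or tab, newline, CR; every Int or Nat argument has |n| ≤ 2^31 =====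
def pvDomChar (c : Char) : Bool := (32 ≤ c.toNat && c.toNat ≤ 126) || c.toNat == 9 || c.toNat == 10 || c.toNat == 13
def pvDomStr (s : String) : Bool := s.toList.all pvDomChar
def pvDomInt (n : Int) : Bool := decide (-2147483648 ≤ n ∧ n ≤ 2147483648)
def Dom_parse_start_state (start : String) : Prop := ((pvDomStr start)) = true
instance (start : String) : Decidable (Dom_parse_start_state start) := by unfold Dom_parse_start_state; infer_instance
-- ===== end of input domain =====

-- B replaces A's incremental dict-of-lists accumulation by a flat crate-event list that is
-- then grouped per key (first-appearance key order, one filter pass per key): an alternative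
-- decomposition, same results.

-- ===== PORT A =====
-- A: walk rows bottom-up, append each crate to d[i+1] in an insertion-ordered dict.
def parse_start_state (start : String) : List (Int × List String) :=
  (((PySem.Str.split? start "\n").getD []).reverse.foldl
    (fun d row =>
      (PySem.List.enumerate ((PySem.List.slice? row.toList (some 1) none 4).getD [])).foldl
        (fun d p =>
          if p.2 ≠ ' ' then d.modify (p.1 + 1) [] (fun l => l ++ [String.ofList [p.2]]) else d)
        d)
    PySem.Dict.empty).items

-- ===== PORT B =====
-- the flat bottom-up (column, letter) event list
def pvCrates (start : String) : List (Int × String) :=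
  ((PySem.Str.split? start "\n").getD []).reverse.flatMap
    (fun row =>
      (PySem.List.enumerate ((PySem.List.slice? row.toList (some 1) none 4).getD [])).filterMap
        (fun p => if p.2 ≠ ' ' then some (p.1 + 1, String.ofList [p.2]) else none))

def parse_start_state_alt (start : String) : List (Int × List String) :=
  let crates := pvCrates start
  ((PySem.List.dedup (crates.map (·.1))).foldl
    (fun d key => d.insert key ((crates.filter (fun p => p.1 == key)).map (·.2)))
    PySem.Dict.empty).items

-- ===== PRECONDITION & SPEC =====
def Spec_parse_start_state (start : String) (out : List (Int × List String)) : Prop := out = parse_start_state_alt start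
instance (start : String) (out : List (Int × List String)) : Decidable (Spec_parse_start_state start out) := by unfold Spec_parse_start_state; infer_instance

-- ===== CLAIM (what is proved, stated in full; the proofs are below) =====
def Claim_equal_parse_start_state : Prop := ∀ (start : String), Dom_parse_start_state start → Spec_parse_start_state start (parse_start_state start)

-- ===== LEMMAS AND PROOFS =====

-- A's inner loop over one row equals a modify-fold over that row's filtered events.
theorem pv_row_fold (l : List (Int × Char)) (d : PySem.Dict Int (List String)) :
    l.foldl
      (fun d p =>
        if p.2 ≠ ' ' then d.modify (p.1 + 1) [] (fun l => l ++ [String.ofList [p.2]]) else d) d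
    = (l.filterMap (fun p => if p.2 ≠ ' ' then some (p.1 + 1, String.ofList [p.2]) else none)).foldl
        (fun d q => d.modify q.1 [] (fun l => l ++ [q.2])) d := by
  induction l generalizing d with
  | nil => rfl
  | cons p t ih =>
    simp only [List.foldl_cons, List.filterMap_cons]
    by_cases h : p.2 = ' '
    · rw [if_neg (by simp [h]), if_neg (by simp [h])]
      exact ih d
    · rw [if_pos h, if_pos h, List.foldl_cons]
      exact ih _

-- A's whole dict is the modify-fold over the flat event list.
theorem pv_dict_eq (start : String) :
    ((PySem.Str.split? start "\n").getD []).reverse.foldl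
      (fun d row =>
        (PySem.List.enumerate ((PySem.List.slice? row.toList (some 1) none 4).getD [])).foldl
          (fun d p =>
            if p.2 ≠ ' ' then d.modify (p.1 + 1) [] (fun l => l ++ [String.ofList [p.2]]) else d)
          d)
      PySem.Dict.empty
    = (pvCrates start).foldl (fun d q => d.modify q.1 [] (fun l => l ++ [q.2]))
        PySem.Dict.empty := by
  unfold pvCrates
  rw [List.foldl_flatMap]
  exact PySem.List.foldl_congr_mem _ _ _ _ (fun d row _ => pv_row_fold _ d)

theorem pv_modify_items (crates : List (Int × String)) :
    (crates.foldl (fun d q => d.modify q.1 [] (fun l => l ++ [q.2]))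
        (PySem.Dict.empty : PySem.Dict Int (List String))).items
    = (PySem.Set.ofList (crates.map (·.1))).map
        (fun k => (k, (crates.filter (fun p => p.1 == k)).map (·.2))) := by
  have hnd : (crates.foldl (fun d q => d.modify q.1 [] (fun l => l ++ [q.2]))
      (PySem.Dict.empty : PySem.Dict Int (List String))).keys.Nodup := by
    exact PySem.Dict.nodup_keys_foldl_modify_key crates (fun q => q.1) []
      (fun _ q => fun l => l ++ [q.2]) _ (by simp [PySem.Dict.keys_empty])
  rw [PySem.Dict.items_eq_map_keys _ hnd []]
  rw [PySem.Dict.keys_foldl_modify_key crates (fun q => q.1) []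
      (fun _ q => fun l => l ++ [q.2])]
  simp only [PySem.Dict.keys_empty]
  have hupd : PySem.Set.update ([] : List Int) (crates.map (·.1))
      = PySem.Set.ofList (crates.map (·.1)) := by
    rw [PySem.Set.ofList_eq_foldl]; rfl
  rw [hupd]
  refine List.map_congr_left (fun k _ => ?_)
  rw [PySem.Dict.getD_foldl_modify_append]
  simp [PySem.Dict.getD_empty]

theorem pv_alt_items (crates : List (Int × String)) :
    ((PySem.List.dedup (crates.map (·.1))).foldl
      (fun d key => d.insert key ((crates.filter (fun p => p.1 == key)).map (·.2)))
      (PySem.Dict.empty : PySem.Dict Int (List String))).items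
    = (PySem.Set.ofList (crates.map (·.1))).map
        (fun k => (k, (crates.filter (fun p => p.1 == k)).map (·.2))) := by
  rw [PySem.Dict.items_foldl_insert_fresh _ (fun k => k)
        (fun k => (crates.filter (fun p => p.1 == k)).map (·.2)) _
        (fun a _ => PySem.Dict.contains_empty a)
        (by simp)]
  simp [PySem.List.dedup_eq_ofList, PySem.Dict.empty]

-- ===== VERDICT (by name: the statement is the Claim_ definition above) =====
theorem parse_start_state_spec : Claim_equal_parse_start_state := by
  intro start _
  unfold Spec_parse_start_state parse_start_state parse_start_state_alt
  rw [pv_dict_eq, pv_modify_items, pv_alt_items]
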